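-- pv_equiv track=rewrite | github.com/cemanaral/zipcodeapp | zipcodeapp.py | find_pop
-- ===== SOURCE A (Python) =====
-- def find_pop(line):
--     start = line.index('Total population</dt><dd>') + 25
--     c = 0
--     population = ''
--     while line[c + start] != '<':
--         char = line[c + start]
--         if char.isdigit() or char == ',':
--             population += char
--         c += 1
--     return population
-- ===== SOURCE B (Python) =====
-- # Table-driven rewrite: partition off the <dd> text, then delete unwanted
-- # characters with str.translate over a precomputed deletion table
-- # (no per-character test loop in this code at all).
-- _DELETE = {i: None for i in range(128) if not (48 <= i <= 57 or i == 44)}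
--
-- def find_pop(line):
--     start = line.index('Total population</dt><dd>') + 25
--     head, _sep, _rest = line[start:].partition('<')
--     return head.translate(_DELETE)
-- ===== Notes on version B (the rewrite author's own statement) =====
-- stated objective: idiomatic
-- what changed: Replaces A's manual index-arithmetic while-loop with per-character tests by stdlib machinery: str.partition takes the dd-element text in one call and a precomputed 128-entry deletion table fed to str.translate removes everything but digits and commas, so B contains no character-testing loop at all.
import Mathlib
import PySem

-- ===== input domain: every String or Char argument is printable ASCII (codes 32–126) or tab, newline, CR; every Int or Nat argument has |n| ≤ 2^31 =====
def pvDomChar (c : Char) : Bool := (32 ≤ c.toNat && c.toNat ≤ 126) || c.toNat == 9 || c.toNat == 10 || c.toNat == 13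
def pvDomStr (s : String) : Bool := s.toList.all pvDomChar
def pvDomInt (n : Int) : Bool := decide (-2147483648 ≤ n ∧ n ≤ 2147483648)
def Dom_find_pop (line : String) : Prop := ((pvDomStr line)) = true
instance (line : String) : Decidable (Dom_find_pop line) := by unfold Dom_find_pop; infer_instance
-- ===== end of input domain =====

-- B replaces A's manual while-loop scan by partition('<') plus a precomputed str.translate deletion table; same return value wherever A returns (Pre_ excludes the inputs where A raises).


-- ===== PORT A =====
-- A's while loop: walk the chars after `start` one by one, accumulating digits and commas
-- until a '<' is met.  Python raises IndexError when the string ends before a '<'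
-- (excluded by Pre_); there the recursion just stops.
def findPopLoopA : List Char → List Char → List Char
  | [], acc => acc
  | c :: rest, acc =>
      if c = '<' then acc
      else findPopLoopA rest (if c.isDigit || c = ',' then acc ++ [c] else acc)

def find_pop (line : String) : String :=
  -- line.index(marker) raises ValueError when absent (excluded by Pre_); PySem.Str.find returns -1 there.
  let idx := PySem.Str.find line "Total population</dt><dd>"
  if idx = -1 then ""
  else String.mk (findPopLoopA (line.toList.drop (idx + 25).toNat) [])

-- ===== PORT B =====
-- B: start as in A; `line[start:].partition('<')` head ported as takeWhile (· ≠ '<')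
-- (exact: for a single-char separator, partition's first component is the prefix up
-- to the first '<', the whole tail if none).  `head.translate(_DELETE)` deletes every
-- char of code < 128 that is not an ASCII digit or ','; ported as a filter keeping
-- exactly the chars translate keeps (codes ≥ 128 map to themselves — exact).
def find_pop_alt (line : String) : String :=
  let idx := PySem.Str.find line "Total population</dt><dd>"
  if idx = -1 then ""
  else
    let head := (line.toList.drop (idx + 25).toNat).takeWhile (· ≠ '<')
    String.mk (head.filter (fun c => 128 ≤ c.toNat || (48 ≤ c.toNat && c.toNat ≤ 57) || c = ','))

-- ===== PRECONDITION & SPEC =====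
-- Pre_ excludes exactly the inputs where A raises: ValueError when the marker is absent,
-- IndexError when no '<' follows the marker.
def Pre_find_pop (line : String) : Prop :=
  PySem.Str.find line "Total population</dt><dd>" ≠ -1 ∧
  '<' ∈ line.toList.drop (PySem.Str.find line "Total population</dt><dd>" + 25).toNat
instance (line : String) : Decidable (Pre_find_pop line) := by unfold Pre_find_pop; infer_instance

def pvWitness_find_pop : String := "Total population</dt><dd>1,234</dd>"

def Spec_find_pop (line : String) (out : String) : Prop := out = find_pop_alt line
instance (line : String) (out : String) : Decidable (Spec_find_pop line out) := by unfold Spec_find_pop; infer_instance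

-- ===== CLAIM (what is proved, stated in full; the proofs are below) =====
def Claim_equal_find_pop : Prop := ∀ (line : String), Dom_find_pop line → Pre_find_pop line → Spec_find_pop line (find_pop line)

-- ===== LEMMAS AND PROOFS =====

lemma findPopLoopA_eq (l : List Char) :
    ∀ acc, '<' ∈ l →
      findPopLoopA l acc = acc ++ (l.takeWhile (· ≠ '<')).filter (fun c => c.isDigit || c = ',') := by
  induction l with
  | nil => intro acc h; cases h
  | cons c rest ih =>
      intro acc h
      by_cases hc : c = '<'
      · subst hc
        simp [findPopLoopA, List.takeWhile]
      · have hmem : '<' ∈ rest := by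
          rcases List.mem_cons.mp h with h1 | h1
          · exact absurd h1.symm hc
          · exact h1
        simp only [findPopLoopA, if_neg hc, List.takeWhile]
        rw [ih _ hmem]
        by_cases hd : c.isDigit || c = ','
        · simp [hc, hd]
        · simp [hc, hd]

-- On the ASCII domain the two filter predicates agree: no char reaches code 128,
-- and Char.isDigit is exactly 48 ≤ code ≤ 57.
lemma filter_pred_agree (c : Char) (h : pvDomChar c = true) :
    (c.isDigit || c = ',') =
      (128 ≤ c.toNat || (48 ≤ c.toNat && c.toNat ≤ 57) || c = ',') := by
  have hlt : c.toNat < 128 := by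
    simp [pvDomChar] at h
    omega
  have e1 : decide ('0'.val ≤ c.val) = decide (48 ≤ c.toNat) := by
    apply decide_eq_decide.mpr
    rw [UInt32.le_iff_toNat_le]
    exact Iff.rfl
  have e2 : decide (c.val ≤ '9'.val) = decide (c.toNat ≤ 57) := by
    apply decide_eq_decide.mpr
    rw [UInt32.le_iff_toNat_le]
    exact Iff.rfl
  simp only [Char.isDigit, ge_iff_le, e1, e2,
    decide_eq_false (Nat.not_le.mpr hlt), Bool.false_or]

lemma find_pop_eq_alt (line : String) (hdom : Dom_find_pop line) (h : Pre_find_pop line) :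
    find_pop line = find_pop_alt line := by
  obtain ⟨h1, h2⟩ := h
  unfold find_pop find_pop_alt
  simp only [if_neg h1]
  set tail := line.toList.drop ((PySem.Str.find line "Total population</dt><dd>") + 25).toNat with htail
  rw [findPopLoopA_eq tail [] h2]
  simp only [List.nil_append]
  congr 1
  apply List.filter_congr
  intro c hmem
  have hline : c ∈ line.toList := List.mem_of_mem_drop (List.takeWhile_subset _ hmem)
  have hc : pvDomChar c = true := by
    have := hdom
    unfold Dom_find_pop pvDomStr at this
    exact (List.all_eq_true.mp this) c hline
  exact filter_pred_agree c hc

-- ===== VERDICT =====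
theorem find_pop_spec : Claim_equal_find_pop := by
  intro line hdom hpre
  unfold Spec_find_pop
  exact find_pop_eq_alt line hdom hpre
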